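-- pv_equiv track=rewrite | github.com/premx95/RNA-seq-Analysis-Pipeline-Automated- | prem_code.py | _parse_drug_info
-- ===== SOURCE A (Python) =====
-- from typing import Dict, List, Tuple, Optional
--
-- def _parse_drug_info(drug_content: str, target_gene: str) -> Optional[str]:
--     """
--     Parse KEGG drug information to extract relevant details
--
--     Args:
--         drug_content: Raw KEGG drug entry content
--         target_gene: Target gene name
--
--     Returns:
--         Formatted drug information string
--     """
--     info_lines = []
--     in_target_section = False
--     in_comment_section = False
--
--     for line in drug_content.split('\n'):
--         if line.startswith('TARGET'):
--             in_target_section = True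
--             if target_gene.lower() in line.lower():
--                 info_lines.append(line.strip())
--         elif in_target_section and line.startswith(' '):
--             if target_gene.lower() in line.lower():
--                 info_lines.append(line.strip())
--         elif line.strip() and not line.startswith(' ') and in_target_section:
--             in_target_section = False
--
--         if line.startswith('COMMENT'):
--             in_comment_section = True
--             info_lines.append(line.strip())
--         elif in_comment_section and line.startswith(' '):
--             info_lines.append(line.strip())
--         elif line.strip() and not line.startswith(' ') and in_comment_section:
--             in_comment_section = False
--
--     return '\n'.join(info_lines) if info_lines else None
-- ===== SOURCE B (Python) =====
-- def _parse_drug_info(drug_content: str, target_gene: str):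
--     # Block-based re-implementation: group lines into header+continuation blocks, then emit.
--     blocks = []
--     cur = None
--     for line in drug_content.split('\n'):
--         if line.strip() and not line.startswith(' '):
--             cur = (line, [])
--             blocks.append(cur)
--         elif cur is not None:
--             cur[1].append(line)
--     gene = target_gene.lower()
--     out = []
--     for header, conts in blocks:
--         if header.startswith('TARGET'):
--             if gene in header.lower():
--                 out.append(header.strip())
--             for c in conts:
--                 if c.startswith(' ') and gene in c.lower():
--                     out.append(c.strip())
--         elif header.startswith('COMMENT'):
--             out.append(header.strip())
--             for c in conts:
--                 if c.startswith(' '):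
--                     out.append(c.strip())
--     return '\n'.join(out) if out else None
-- ===== Notes on version B (the rewrite author's own statement) =====
-- stated objective: alternative
-- what changed: Replaces A's one-pass two-flag state machine by a two-phase decomposition: first group lines into header+continuation blocks, then emit output per block (TARGET blocks filtered by the gene, COMMENT blocks verbatim).
import Mathlib
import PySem

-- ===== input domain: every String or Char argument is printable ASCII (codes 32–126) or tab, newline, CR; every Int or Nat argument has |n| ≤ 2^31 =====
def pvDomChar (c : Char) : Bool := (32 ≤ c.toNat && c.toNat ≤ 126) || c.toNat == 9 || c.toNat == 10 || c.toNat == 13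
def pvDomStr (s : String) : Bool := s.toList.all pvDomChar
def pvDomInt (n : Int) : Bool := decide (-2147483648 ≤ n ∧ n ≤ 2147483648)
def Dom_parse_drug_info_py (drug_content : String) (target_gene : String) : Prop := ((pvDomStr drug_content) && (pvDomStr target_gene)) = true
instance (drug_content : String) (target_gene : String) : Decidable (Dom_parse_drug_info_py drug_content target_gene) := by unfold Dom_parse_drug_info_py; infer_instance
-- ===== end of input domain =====

-- B re-decomposes A's two-flag line scanner into group-into-blocks + emit-per-block; same return value, proved equal below.

-- ===== PORT A =====
-- one loop iteration of A: state (info_lines, in_target_section, in_comment_section)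
def pvAstep (g : List Char) (st : List (List Char) × Bool × Bool) (line : List Char) :
    List (List Char) × Bool × Bool :=
  let p1 : List (List Char) × Bool :=
    if PySem.Chars.startswith line ['T','A','R','G','E','T'] then
      ((if PySem.Chars.isIn g (PySem.Chars.lower line) then st.1 ++ [PySem.Chars.strip line] else st.1), true)
    else if st.2.1 && PySem.Chars.startswith line [' '] then
      ((if PySem.Chars.isIn g (PySem.Chars.lower line) then st.1 ++ [PySem.Chars.strip line] else st.1), st.2.1)
    else if !(PySem.Chars.strip line).isEmpty && !PySem.Chars.startswith line [' '] && st.2.1 then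
      (st.1, false)
    else (st.1, st.2.1)
  let p2 : List (List Char) × Bool :=
    if PySem.Chars.startswith line ['C','O','M','M','E','N','T'] then
      (p1.1 ++ [PySem.Chars.strip line], true)
    else if st.2.2 && PySem.Chars.startswith line [' '] then
      (p1.1 ++ [PySem.Chars.strip line], st.2.2)
    else if !(PySem.Chars.strip line).isEmpty && !PySem.Chars.startswith line [' '] && st.2.2 then
      (p1.1, false)
    else (p1.1, st.2.2)
  (p2.1, p1.2, p2.2)

def parse_drug_info_py (drug_content : String) (target_gene : String) : Option String :=
  let g := PySem.Chars.lower target_gene.toList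
  let lines := PySem.Chars.splitOn drug_content.toList ['\n']
  let info := (lines.foldl (pvAstep g) ([], false, false)).1
  if info.isEmpty then none
  else some (String.ofList (PySem.Chars.join ['\n'] info))

-- ===== PORT B =====
-- a header line: non-blank and not indented
def pvIsHeaderB (line : List Char) : Bool :=
  !(PySem.Chars.strip line).isEmpty && !PySem.Chars.startswith line [' ']

-- phase 1 of B: group lines into (header, continuation lines) blocks
def pvGroupB : List (List Char) → Option (List Char × List (List Char)) → List (List Char × List (List Char))
  | [], cur => cur.toList
  | l :: rest, cur =>
    if pvIsHeaderB l then cur.toList ++ pvGroupB rest (some (l, []))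
    else match cur with
      | none => pvGroupB rest none
      | some (h, cs) => pvGroupB rest (some (h, cs ++ [l]))

-- phase 2 of B: output of one block
def pvEmitB (g : List Char) (b : List Char × List (List Char)) : List (List Char) :=
  if PySem.Chars.startswith b.1 ['T','A','R','G','E','T'] then
    (if PySem.Chars.isIn g (PySem.Chars.lower b.1) then [PySem.Chars.strip b.1] else [])
      ++ b.2.flatMap (fun c =>
           if PySem.Chars.startswith c [' '] && PySem.Chars.isIn g (PySem.Chars.lower c) then
             [PySem.Chars.strip c] else [])
  else if PySem.Chars.startswith b.1 ['C','O','M','M','E','N','T'] then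
    PySem.Chars.strip b.1
      :: b.2.flatMap (fun c => if PySem.Chars.startswith c [' '] then [PySem.Chars.strip c] else [])
  else []

def parse_drug_info_py_alt (drug_content : String) (target_gene : String) : Option String :=
  let g := PySem.Chars.lower target_gene.toList
  let lines := PySem.Chars.splitOn drug_content.toList ['\n']
  let out := (pvGroupB lines none).flatMap (pvEmitB g)
  if out.isEmpty then none
  else some (String.ofList (PySem.Chars.join ['\n'] out))

-- ===== PRECONDITION & SPEC =====
def Spec_parse_drug_info_py (drug_content : String) (target_gene : String) (out : Option String) : Prop := out = parse_drug_info_py_alt drug_content target_gene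
instance (drug_content : String) (target_gene : String) (out : Option String) : Decidable (Spec_parse_drug_info_py drug_content target_gene out) := by unfold Spec_parse_drug_info_py; infer_instance

-- ===== CLAIM (what is proved, stated in full; the proofs are below) =====
def Claim_equal_parse_drug_info_py : Prop := ∀ (drug_content : String) (target_gene : String), Dom_parse_drug_info_py drug_content target_gene → Spec_parse_drug_info_py drug_content target_gene (parse_drug_info_py drug_content target_gene)

-- ===== LEMMAS AND PROOFS =====

-- the common behaviour: output of the remaining lines given the current section flags
def pvRun (g : List Char) : Bool → Bool → List (List Char) → List (List Char)
  | _, _, [] => []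
  | t, c, l :: ls =>
    if PySem.Chars.startswith l ['T','A','R','G','E','T'] then
      (if PySem.Chars.isIn g (PySem.Chars.lower l) then [PySem.Chars.strip l] else []) ++ pvRun g true false ls
    else if PySem.Chars.startswith l ['C','O','M','M','E','N','T'] then
      PySem.Chars.strip l :: pvRun g false true ls
    else if pvIsHeaderB l then pvRun g false false ls
    else
      (if PySem.Chars.startswith l [' '] then
        (if t then (if PySem.Chars.isIn g (PySem.Chars.lower l) then [PySem.Chars.strip l] else [])
         else if c then [PySem.Chars.strip l] else [])
       else []) ++ pvRun g t c ls

lemma pv_head {l p : List Char} {c : Char} (h : PySem.Chars.startswith l (c :: p) = true) :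
    ∃ r, l = c :: r := by
  have := (PySem.Chars.startswith_iff l (c :: p)).mp h
  obtain ⟨r, hr⟩ := this
  exact ⟨p ++ r, by simpa using hr.symm⟩

lemma pv_sw_cons_false {c c' : Char} (hne : (c' == c) = false) (r p : List Char) :
    PySem.Chars.startswith (c :: r) (c' :: p) = false := by
  simp [PySem.Chars.startswith, List.isPrefixOf, hne]

lemma pv_strip_cons {c : Char} (r : List Char) (hs : PySem.Chars.isspace c = false) :
    (PySem.Chars.strip (c :: r)).isEmpty = false := by
  simp only [PySem.Chars.strip, PySem.Chars.lstrip, PySem.Chars.rstrip, List.dropWhile_cons, hs,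
    Bool.false_eq_true, if_false, List.isEmpty_eq_false_iff, ne_eq, List.reverse_eq_nil_iff]
  intro hnil
  have : ∀ x ∈ (c :: r).reverse, PySem.Chars.isspace x = true := List.dropWhile_eq_nil_iff.mp hnil
  have := this c (by simp)
  simp [hs] at this

-- facts about a TARGET header line
lemma pv_target_facts {l : List Char} (h : PySem.Chars.startswith l ['T','A','R','G','E','T'] = true) :
    PySem.Chars.startswith l [' '] = false ∧ PySem.Chars.startswith l ['C','O','M','M','E','N','T'] = false ∧
      (PySem.Chars.strip l).isEmpty = false := by
  obtain ⟨r, rfl⟩ := pv_head h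
  exact ⟨pv_sw_cons_false (by decide) _ _, pv_sw_cons_false (by decide) _ _, pv_strip_cons _ (by decide)⟩

-- facts about a COMMENT header line
lemma pv_comment_facts {l : List Char} (h : PySem.Chars.startswith l ['C','O','M','M','E','N','T'] = true) :
    PySem.Chars.startswith l [' '] = false ∧ PySem.Chars.startswith l ['T','A','R','G','E','T'] = false ∧
      (PySem.Chars.strip l).isEmpty = false := by
  obtain ⟨r, rfl⟩ := pv_head h
  exact ⟨pv_sw_cons_false (by decide) _ _, pv_sw_cons_false (by decide) _ _, pv_strip_cons _ (by decide)⟩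

-- a non-header line is neither a TARGET nor a COMMENT header
lemma pv_nonheader_facts {l : List Char} (h : pvIsHeaderB l = false) :
    PySem.Chars.startswith l ['T','A','R','G','E','T'] = false ∧
      PySem.Chars.startswith l ['C','O','M','M','E','N','T'] = false := by
  constructor
  · by_cases hT : PySem.Chars.startswith l ['T','A','R','G','E','T'] = true
    · obtain ⟨h1, _, h3⟩ := pv_target_facts hT
      simp [pvIsHeaderB, h1, h3] at h
    · simpa using hT
  · by_cases hC : PySem.Chars.startswith l ['C','O','M','M','E','N','T'] = true
    · obtain ⟨h1, _, h3⟩ := pv_comment_facts hC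
      simp [pvIsHeaderB, h1, h3] at h
    · simpa using hC

-- A's fold equals pvRun
lemma pvA_run (g : List Char) :
    ∀ (ls : List (List Char)) (info : List (List Char)) (t c : Bool), (t && c) = false →
      (ls.foldl (pvAstep g) (info, t, c)).1 = info ++ pvRun g t c ls := by
  intro ls
  induction ls with
  | nil => intro info t c _; simp [pvRun]
  | cons l ls ih =>
    intro info t c hinv
    rw [List.foldl_cons]
    by_cases hT : PySem.Chars.startswith l ['T','A','R','G','E','T'] = true
    · obtain ⟨h1, h2, h3⟩ := pv_target_facts hT
      have hstep : pvAstep g (info, t, c) l =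
          ((if PySem.Chars.isIn g (PySem.Chars.lower l) then info ++ [PySem.Chars.strip l] else info),
            true, false) := by
        cases c <;> simp [pvAstep, hT, h1, h2, h3]
      rw [hstep, ih _ true false (by simp)]
      simp only [pvRun, hT, if_true]
      by_cases hg : PySem.Chars.isIn g (PySem.Chars.lower l) = true <;> simp [hg]
    · have hT' : PySem.Chars.startswith l ['T','A','R','G','E','T'] = false := by simpa using hT
      by_cases hC : PySem.Chars.startswith l ['C','O','M','M','E','N','T'] = true
      · obtain ⟨h1, _, h3⟩ := pv_comment_facts hC
        have hstep : pvAstep g (info, t, c) l = (info ++ [PySem.Chars.strip l], false, true) := by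
          cases t <;> simp [pvAstep, hT', hC, h1, h3]
        rw [hstep, ih _ false true (by simp)]
        simp [pvRun, hT', hC]
      · have hC' : PySem.Chars.startswith l ['C','O','M','M','E','N','T'] = false := by simpa using hC
        by_cases hH : pvIsHeaderB l = true
        · have h1 : PySem.Chars.startswith l [' '] = false := by
            simp [pvIsHeaderB] at hH; simp [hH.2]
          have h3 : (PySem.Chars.strip l).isEmpty = false := by
            simp [pvIsHeaderB] at hH; simp [hH.1]
          have hstep : pvAstep g (info, t, c) l = (info, false, false) := by
            cases t <;> cases c <;> simp [pvAstep, hT', hC', h1, h3]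
          rw [hstep, ih _ false false (by simp)]
          simp [pvRun, hT', hC', hH]
        · have hH' : pvIsHeaderB l = false := by simpa using hH
          by_cases hSp : PySem.Chars.startswith l [' '] = true
          · -- indented continuation line
            have hstep : pvAstep g (info, t, c) l =
                ((info ++ (if t then (if PySem.Chars.isIn g (PySem.Chars.lower l) then [PySem.Chars.strip l] else [])
                   else if c then [PySem.Chars.strip l] else [])), t, c) := by
              cases t <;> cases c <;> simp_all [pvAstep] <;>
                by_cases hg : PySem.Chars.isIn g (PySem.Chars.lower l) = true <;> simp [hg]
            rw [hstep, ih _ t c hinv]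
            simp only [pvRun]
            simp [hT', hC', hH', hSp, List.append_assoc]
          · -- blank line: nothing happens
            have hSp' : PySem.Chars.startswith l [' '] = false := by simpa using hSp
            have h3 : (PySem.Chars.strip l).isEmpty = true := by
              by_contra hne
              have : pvIsHeaderB l = true := by
                simp [pvIsHeaderB, hSp']; simpa using hne
              simp [this] at hH'
            have hstep : pvAstep g (info, t, c) l = (info, t, c) := by
              cases t <;> cases c <;> simp [pvAstep, hT', hC', hSp', h3]
            rw [hstep, ih _ t c hinv]
            simp [pvRun, hT', hC', hH', hSp']

-- the flags corresponding to a pending block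
def pvT : Option (List Char × List (List Char)) → Bool
  | none => false
  | some (h, _) => PySem.Chars.startswith h ['T','A','R','G','E','T']

def pvC : Option (List Char × List (List Char)) → Bool
  | none => false
  | some (h, _) => !PySem.Chars.startswith h ['T','A','R','G','E','T'] && PySem.Chars.startswith h ['C','O','M','M','E','N','T']

def pvPend (g : List Char) : Option (List Char × List (List Char)) → List (List Char)
  | none => []
  | some b => pvEmitB g b

-- B's group-then-emit equals pvRun
lemma pvB_run (g : List Char) :
    ∀ (ls : List (List Char)) (cur : Option (List Char × List (List Char))),
      (pvGroupB ls cur).flatMap (pvEmitB g) = pvPend g cur ++ pvRun g (pvT cur) (pvC cur) ls := by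
  intro ls
  induction ls with
  | nil =>
    intro cur
    cases cur <;> simp [pvGroupB, pvRun, pvPend, Option.toList]
  | cons l ls ih =>
    intro cur
    by_cases hH : pvIsHeaderB l = true
    · have hcur : (Option.toList cur).flatMap (pvEmitB g) = pvPend g cur := by
        cases cur <;> simp [pvPend, Option.toList]
      rw [pvGroupB.eq_def]
      simp only []
      rw [if_pos hH, List.flatMap_append, ih (some (l, [])), hcur]
      congr 1
      by_cases hT : PySem.Chars.startswith l ['T','A','R','G','E','T'] = true
      · simp [pvRun, pvPend, pvEmitB, pvT, pvC, hT]
      · have hT' : PySem.Chars.startswith l ['T','A','R','G','E','T'] = false := by simpa using hT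
        by_cases hC : PySem.Chars.startswith l ['C','O','M','M','E','N','T'] = true
        · simp [pvRun, pvPend, pvEmitB, pvT, pvC, hT', hC]
        · have hC' : PySem.Chars.startswith l ['C','O','M','M','E','N','T'] = false := by simpa using hC
          simp [pvRun, pvPend, pvEmitB, pvT, pvC, hT', hC', hH]
    · have hH' : pvIsHeaderB l = false := by simpa using hH
      obtain ⟨hT', hC'⟩ := pv_nonheader_facts hH'
      cases cur with
      | none =>
        rw [pvGroupB.eq_def]
        simp only []
        rw [if_neg (by simp [hH'])]
        rw [ih none]
        simp [pvRun, pvT, pvC, pvPend, hT', hC', hH']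
      | some b =>
        obtain ⟨h, cs⟩ := b
        rw [pvGroupB.eq_def]
        simp only []
        rw [if_neg (by simp [hH']), ih (some (h, cs ++ [l]))]
        have hemit : pvEmitB g (h, cs ++ [l]) = pvEmitB g (h, cs) ++
            (if PySem.Chars.startswith l [' '] then
              (if pvT (some (h, cs)) then
                (if PySem.Chars.isIn g (PySem.Chars.lower l) then [PySem.Chars.strip l] else [])
               else if pvC (some (h, cs)) then [PySem.Chars.strip l] else [])
             else []) := by
          simp only [pvEmitB, pvT, pvC, List.flatMap_append, List.flatMap_cons,
            List.flatMap_nil, List.append_nil]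
          split_ifs <;> simp_all
        have hrunT : pvT (some (h, cs ++ [l])) = pvT (some (h, cs)) := rfl
        have hrunC : pvC (some (h, cs ++ [l])) = pvC (some (h, cs)) := rfl
        rw [hrunT, hrunC, pvPend, pvPend, hemit, List.append_assoc]
        congr 1
        simp [pvRun, hT', hC', hH']

-- ===== VERDICT (by name: the statement is the Claim_ definition above) =====
theorem parse_drug_info_py_spec : Claim_equal_parse_drug_info_py := by
  unfold Claim_equal_parse_drug_info_py
  intro drug_content target_gene _
  unfold Spec_parse_drug_info_py parse_drug_info_py parse_drug_info_py_alt
  have hA := pvA_run (PySem.Chars.lower target_gene.toList)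
    (PySem.Chars.splitOn drug_content.toList ['\n']) [] false false (by simp)
  have hB := pvB_run (PySem.Chars.lower target_gene.toList)
    (PySem.Chars.splitOn drug_content.toList ['\n']) none
  simp only [] at *
  rw [hA, hB]
  rfl
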